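-- pv_equiv track=rewrite | github.com/nermadie/CodeForces_Solutions | CodeforcesRound1050Div4/prob04.py | solve
-- ===== SOURCE A (Python) =====
-- def solve(n, a):
--   result = 0
--   odd_list = []
--   for i in range(n):
--     if a[i] % 2 != 0:
--       odd_list.append(a[i])
--     else:
--       result += a[i]
--   if len(odd_list) == 0:
--     return 0
--   odd_list.sort()
--   for i in range(len(odd_list)//2, len(odd_list)):
--     result += odd_list[i]
--   return result
-- ===== SOURCE B (Python) =====
-- def _sum_smallest(xs, k):
--     # sum of the k smallest elements of xs (multiset), by quickselect partitioning
--     if k <= 0: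
--         return 0
--     if k >= len(xs):
--         return sum(xs)
--     p = xs[len(xs) // 2]
--     lo = [x for x in xs if x < p]
--     eq = [x for x in xs if x == p]
--     hi = [x for x in xs if x > p]
--     if k <= len(lo):
--         return _sum_smallest(lo, k)
--     if k <= len(lo) + len(eq):
--         return sum(lo) + p * (k - len(lo))
--     return sum(lo) + sum(eq) + _sum_smallest(hi, k - len(lo) - len(eq))
--
-- def solve(n, a):
--     evens = 0
--     odds = []
--     for x in a[:max(n, 0)]:
--         if x % 2:
--             odds.append(x)
--         else:
--             evens += x
--     if not odds:
--         return 0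
--     return evens + sum(odds) - _sum_smallest(odds, len(odds) // 2)
-- ===== Notes on version B (the rewrite author's own statement) =====
-- stated objective: alternative
-- what changed: replaces sort-then-sum-upper-half of the odd values by a quickselect-style recursive partition that sums the larger half without sorting (expected O(n) selection vs O(n log n) sort)
import Mathlib
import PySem

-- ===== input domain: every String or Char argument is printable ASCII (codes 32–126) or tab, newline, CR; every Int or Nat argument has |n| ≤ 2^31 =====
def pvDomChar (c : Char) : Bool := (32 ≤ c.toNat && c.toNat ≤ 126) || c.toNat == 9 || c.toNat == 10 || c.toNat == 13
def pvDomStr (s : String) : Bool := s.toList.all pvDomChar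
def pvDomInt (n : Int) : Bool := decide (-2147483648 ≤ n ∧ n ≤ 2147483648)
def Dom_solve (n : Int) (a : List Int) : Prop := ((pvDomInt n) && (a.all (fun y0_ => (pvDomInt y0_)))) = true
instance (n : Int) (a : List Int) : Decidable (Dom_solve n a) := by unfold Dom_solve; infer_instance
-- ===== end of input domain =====

-- B changes the selection step: quickselect-style partition summing the larger half of the odds
-- instead of sorting them (alternative algorithm; return value proved identical).

-- ===== PORT A =====
def solve (n : Int) (a : List Int) : Int :=
  let st := (PySem.List.pyRange 0 n 1).foldl
    (fun (st : Int × List Int) i =>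
      -- a[i] is PySem.List.pyGetD a i 0, total under Pre_solve (i stays in range)
      if PySem.Int.mod (PySem.List.pyGetD a i 0) 2 ≠ 0 then (st.1, st.2 ++ [PySem.List.pyGetD a i 0])
      else (st.1 + PySem.List.pyGetD a i 0, st.2))
    (0, [])
  if st.2.length = 0 then 0
  else
    let s := PySem.List.sorted st.2 (fun x => x) false
    (PySem.List.pyRange (PySem.Int.floordiv (s.length : Int) 2) (s.length : Int) 1).foldl
      (fun r i => r + PySem.List.pyGetD s i 0) st.1

-- ===== PORT B =====
def sumSmallest (xs : List Int) (k : Int) : Int :=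
  if k ≤ 0 then 0
  else if (xs.length : Int) ≤ k then xs.sum
  else
    let p := PySem.List.pyGetD xs (PySem.Int.floordiv (xs.length : Int) 2) 0
    let lo := xs.filter (fun x => x < p)
    let eq := xs.filter (fun x => x == p)
    let hi := xs.filter (fun x => p < x)
    if k ≤ (lo.length : Int) then sumSmallest lo k
    else if k ≤ (lo.length : Int) + (eq.length : Int) then
      lo.sum + p * (k - (lo.length : Int))
    else
      lo.sum + eq.sum + sumSmallest hi (k - (lo.length : Int) - (eq.length : Int))
termination_by xs.length
decreasing_by
  all_goals
    simp only [List.length_unattach]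
    have hk : ¬ k ≤ 0 := by assumption
    have hl : ¬ ((xs.length : Int) ≤ k) := by assumption
    have hlen : 0 < xs.length := by omega
    have hp : PySem.List.pyGetD xs (PySem.Int.floordiv (xs.length : Int) 2) 0 ∈ xs := by
      apply PySem.List.pyGetD_mem
      unfold PySem.Raise.InRange PySem.Int.floordiv
      rw [Int.fdiv_eq_ediv, if_pos (Or.inl (by norm_num))]
      omega
    refine Nat.lt_of_lt_of_eq ?_ (List.length_attach (l := xs))
    rw [List.length_filter_lt_length_iff_exists]
    exact ⟨⟨_, hp⟩, List.mem_attach _ _, by simp⟩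

def solve_alt (n : Int) (a : List Int) : Int :=
  let xs := PySem.List.slice a none (some (max n 0))
  let st := xs.foldl
    (fun (st : Int × List Int) x =>
      if PySem.Int.mod x 2 ≠ 0 then (st.1, st.2 ++ [x]) else (st.1 + x, st.2))
    (0, [])
  if st.2 = [] then 0
  else st.1 + st.2.sum - sumSmallest st.2 (PySem.Int.floordiv (st.2.length : Int) 2)

-- ===== PRECONDITION & SPEC =====
-- A indexes a[i] for i in range(n): it raises IndexError iff n > len(a); Pre_ excludes exactly that.
def Pre_solve (n : Int) (a : List Int) : Prop := n ≤ (a.length : Int)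
instance (n : Int) (a : List Int) : Decidable (Pre_solve n a) := by unfold Pre_solve; infer_instance
def pvWitness_solve : Int × List Int := (4, [3, 2, 5, 8])

def Spec_solve (n : Int) (a : List Int) (out : Int) : Prop := out = solve_alt n a
instance (n : Int) (a : List Int) (out : Int) : Decidable (Spec_solve n a out) := by unfold Spec_solve; infer_instance

-- ===== CLAIM (what is proved, stated in full; the proofs are below) =====
def Claim_equal_solve : Prop := ∀ (n : Int) (a : List Int), Dom_solve n a → Pre_solve n a → Spec_solve n a (solve n a)

-- ===== LEMMAS AND PROOFS =====

theorem pv_filter_eq_part (xs : List Int) (p : Int) :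
    (xs.filter (fun x => !decide (x < p))).filter (fun x => x == p) = xs.filter (fun x => x == p) := by
  rw [List.filter_filter]
  refine List.filter_congr ?_
  intro x _
  by_cases h : x = p
  · subst h; simp
  · simp [h]

theorem pv_filter_gt_part (xs : List Int) (p : Int) :
    (xs.filter (fun x => !decide (x < p))).filter (fun x => !(x == p)) = xs.filter (fun x => decide (p < x)) := by
  rw [List.filter_filter]
  refine List.filter_congr ?_
  intro x _
  rcases lt_trichotomy x p with h | h | h
  · simp [not_lt.mpr (le_of_lt h), ne_of_lt h]
    exact h
  · subst h; simp
  · simp [h, ne_of_gt h]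
    exact le_of_lt h

theorem pv_partition_perm (xs : List Int) (p : Int) :
    (xs.filter (fun x => decide (x < p)) ++ (xs.filter (fun x => x == p) ++ xs.filter (fun x => decide (p < x)))).Perm xs := by
  have h1 := List.filter_append_perm (fun x => decide (x < p)) xs
  have h2 := List.filter_append_perm (fun x => x == p) (xs.filter (fun x => !decide (x < p)))
  rw [pv_filter_eq_part, pv_filter_gt_part] at h2
  exact ((List.Perm.refl _).append h2).trans h1

theorem pv_eq_replicate (xs : List Int) (p : Int) :
    xs.filter (fun x => x == p) = List.replicate (xs.filter (fun x => x == p)).length p := by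
  apply List.eq_replicate_of_mem
  intro b hb
  have := (List.mem_filter.mp hb).2
  simpa using this

theorem pv_sorted_split (xs : List Int) (p : Int) :
    PySem.List.sorted xs (fun x => x) false =
      PySem.List.sorted (xs.filter (fun x => decide (x < p))) (fun x => x) false
        ++ (xs.filter (fun x => x == p)
        ++ PySem.List.sorted (xs.filter (fun x => decide (p < x))) (fun x => x) false) := by
  apply PySem.List.sorted_id_eq_of_perm_of_pairwise
  · exact (((PySem.List.sorted_perm _ _ false).append
      ((List.Perm.refl _).append (PySem.List.sorted_perm _ _ false)))).trans (pv_partition_perm xs p)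
  · rw [List.pairwise_append]
    refine ⟨PySem.List.sorted_pairwise _ _, ?_, ?_⟩
    · rw [List.pairwise_append]
      refine ⟨?_, PySem.List.sorted_pairwise _ _, ?_⟩
      · rw [pv_eq_replicate xs p]
        exact List.pairwise_replicate.mpr (Or.inr le_rfl)
      · intro b hb c hc
        have hb' : b = p := by
          have := (List.mem_filter.mp hb).2; simpa using this
        have hc' : p < c := by
          have := (List.mem_filter.mp ((PySem.List.mem_sorted _ _ _ _).mp hc)).2
          simpa using this
        omega
    · intro b hb c hc
      have hb' : b < p := by
        have := (List.mem_filter.mp ((PySem.List.mem_sorted _ _ _ _).mp hb)).2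
        simpa using this
      rcases List.mem_append.mp hc with hc | hc
      · have hc' : c = p := by
          have := (List.mem_filter.mp hc).2; simpa using this
        omega
      · have hc' : p < c := by
          have := (List.mem_filter.mp ((PySem.List.mem_sorted _ _ _ _).mp hc)).2
          simpa using this
        omega

theorem sumSmallest_take (N : ℕ) : ∀ (xs : List Int), xs.length ≤ N → ∀ (k : Int), 0 ≤ k →
    sumSmallest xs k = ((PySem.List.sorted xs (fun x => x) false).take k.toNat).sum := by
  induction N with
  | zero =>
    intro xs hlen k hk
    have hxs : xs = [] := List.eq_nil_of_length_eq_zero (by omega)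
    subst hxs
    have hs : PySem.List.sorted ([] : List Int) (fun x => x) false = [] :=
      (PySem.List.sorted_eq_nil_iff _ _ _).mpr rfl
    rw [sumSmallest.eq_def, hs]
    split_ifs <;> simp_all
  | succ N IH =>
    intro xs hlen k hk
    rw [sumSmallest.eq_def]
    by_cases h0 : k ≤ 0
    · rw [if_pos h0]
      have : k.toNat = 0 := by omega
      simp [this]
    · rw [if_neg h0]
      by_cases h1 : (xs.length : Int) ≤ k
      · rw [if_pos h1]
        rw [List.take_of_length_le (by rw [PySem.List.length_sorted]; omega)]
        exact ((PySem.List.sorted_perm xs _ false).sum_eq).symm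
      · rw [if_neg h1]
        simp only []
        set p := PySem.List.pyGetD xs (PySem.Int.floordiv (xs.length : Int) 2) 0 with hp
        set lo := xs.filter (fun x => decide (x < p)) with hlo
        set eq := xs.filter (fun x => x == p) with heq
        set hi := xs.filter (fun x => decide (p < x)) with hhi
        have hperm := pv_partition_perm xs p
        rw [← hlo, ← heq, ← hhi] at hperm
        have hlens : lo.length + (eq.length + hi.length) = xs.length := by
          have := hperm.length_eq; simpa using this
        have hxlen : 0 < xs.length := by omega
        have hpm : p ∈ xs := by
          rw [hp]
          apply PySem.List.pyGetD_mem
          unfold PySem.Raise.InRange PySem.Int.floordiv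
          rw [Int.fdiv_eq_ediv, if_pos (Or.inl (by norm_num))]
          omega
        have hpe : p ∈ eq := by
          rw [heq, List.mem_filter]; exact ⟨hpm, by simp⟩
        have helen : 0 < eq.length := List.length_pos_of_mem hpe
        have hlolt : lo.length < xs.length := by omega
        have hhilt : hi.length < xs.length := by omega
        have hsplit : PySem.List.sorted xs (fun x => x) false =
            PySem.List.sorted lo (fun x => x) false
              ++ (eq ++ PySem.List.sorted hi (fun x => x) false) := by
          rw [hlo, heq, hhi]; exact pv_sorted_split xs p
        have hsumlo : (PySem.List.sorted lo (fun x => x) false).sum = lo.sum :=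
          (PySem.List.sorted_perm _ _ false).sum_eq
        have hlenlo : (PySem.List.sorted lo (fun x => x) false).length = lo.length :=
          PySem.List.length_sorted _ _ _
        rw [hsplit, List.take_append]
        by_cases h2 : k ≤ (lo.length : Int)
        · rw [if_pos h2]
          rw [IH lo (by omega) k hk]
          have hz : k.toNat - (PySem.List.sorted lo (fun x => x) false).length = 0 := by
            rw [hlenlo]; omega
          rw [hz]
          simp
        · rw [if_neg h2]
          have htklo : (PySem.List.sorted lo (fun x => x) false).take k.toNat
              = PySem.List.sorted lo (fun x => x) false := by
            apply List.take_of_length_le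
            rw [hlenlo]; omega
          rw [htklo, List.take_append]
          by_cases h3 : k ≤ (lo.length : Int) + (eq.length : Int)
          · rw [if_pos h3]
            have htkhi : (PySem.List.sorted hi (fun x => x) false).take
                (k.toNat - (PySem.List.sorted lo (fun x => x) false).length - eq.length) = [] := by
              apply List.take_eq_nil_iff.mpr
              left
              rw [hlenlo]; omega
            rw [htkhi]
            have htke : eq.take (k.toNat - (PySem.List.sorted lo (fun x => x) false).length)
                = List.replicate (k.toNat - lo.length) p := by
              rw [hlenlo]
              conv_lhs => rw [heq, pv_eq_replicate xs p]
              rw [List.take_replicate]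
              congr 1
              rw [← heq]
              omega
            rw [htke]
            simp only [List.sum_append, List.sum_nil, List.sum_replicate, hsumlo, nsmul_eq_mul]
            have hcast : ((k.toNat - lo.length : ℕ) : ℤ) = k - lo.length := by omega
            rw [hcast]; ring
          · rw [if_neg h3]
            have htke : eq.take (k.toNat - (PySem.List.sorted lo (fun x => x) false).length) = eq := by
              apply List.take_of_length_le
              rw [hlenlo]; omega
            rw [htke]
            rw [IH hi (by omega) (k - lo.length - eq.length) (by omega)]
            have hnat : (k - (lo.length : ℤ) - (eq.length : ℤ)).toNat
                = k.toNat - (PySem.List.sorted lo (fun x => x) false).length - eq.length := by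
              rw [hlenlo]; omega
            rw [hnat]
            simp only [List.sum_append, hsumlo]
            ring

theorem pv_fold_eq (n : Int) (a : List Int) (hpre : n ≤ (a.length : Int)) :
    (PySem.List.pyRange 0 n).foldl
      (fun (st : Int × List Int) i =>
        if PySem.Int.mod (PySem.List.pyGetD a i 0) 2 ≠ 0 then (st.1, st.2 ++ [PySem.List.pyGetD a i 0])
        else (st.1 + PySem.List.pyGetD a i 0, st.2)) ((0 : Int), ([] : List Int)) =
      (PySem.List.slice a none (some (max n 0))).foldl
        (fun (st : Int × List Int) x =>
          if PySem.Int.mod x 2 ≠ 0 then (st.1, st.2 ++ [x]) else (st.1 + x, st.2))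
        ((0 : Int), ([] : List Int)) := by
  by_cases hn : n ≤ 0
  · rw [PySem.List.pyRange_one_eq_nil hn]
    have hmax : max n 0 = 0 := by omega
    rw [hmax, PySem.List.slice_to a le_rfl]
    simp
  · have hn' : 0 ≤ n := by omega
    have hmax : max n 0 = n := by omega
    rw [hmax, PySem.List.slice_to a hn']
    have key := PySem.List.foldl_pyRange_pyGetD' (a.take n.toNat) 0
      (fun (st : Int × List Int) x =>
        if PySem.Int.mod x 2 ≠ 0 then (st.1, st.2 ++ [x]) else (st.1 + x, st.2))
      ((0 : Int), ([] : List Int)) (a := 0) le_rfl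
    rw [Int.toNat_zero, List.drop_zero] at key
    have hb : ((a.take n.toNat).length : Int) = n := by
      rw [List.length_take]; omega
    rw [hb] at key
    rw [← key]
    apply PySem.List.foldl_congr_mem
    intro acc j hj
    have hj' := PySem.List.mem_pyRange_one.mp hj
    have hsame : PySem.List.pyGetD a j 0 = PySem.List.pyGetD (a.take n.toNat) j 0 := by
      rw [PySem.List.pyGetD_of_nonneg _ _ hj'.1, PySem.List.pyGetD_of_nonneg _ _ hj'.1]
      rw [List.getD_eq_getElem?_getD, List.getD_eq_getElem?_getD, List.getElem?_take,
        if_pos (by omega)]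
    rw [hsame]

-- ===== VERDICT (by name: the statement is the Claim_ definition above) =====
theorem solve_spec : Claim_equal_solve := by
  intro n a _ hpre
  unfold Pre_solve at hpre
  show Spec_solve n a (solve n a)
  unfold Spec_solve solve solve_alt
  rw [pv_fold_eq n a hpre]
  set st := (PySem.List.slice a none (some (max n 0))).foldl
    (fun (st : Int × List Int) x =>
      if PySem.Int.mod x 2 ≠ 0 then (st.1, st.2 ++ [x]) else (st.1 + x, st.2))
    ((0 : Int), ([] : List Int)) with hst
  by_cases hodds : st.2 = []
  · rw [if_pos (by rw [hodds]; rfl), if_pos hodds]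
  · rw [if_neg (by intro h; exact hodds (List.eq_nil_of_length_eq_zero h)), if_neg hodds]
    set s := PySem.List.sorted st.2 (fun x => x) false with hs
    have hslen : s.length = st.2.length := PySem.List.length_sorted _ _ _
    have hm0 : 0 ≤ PySem.Int.floordiv (s.length : Int) 2 := by
      unfold PySem.Int.floordiv
      rw [Int.fdiv_eq_ediv, if_pos (Or.inl (by norm_num))]
      omega
    rw [PySem.List.foldl_pyRange_pyGetD' s 0 (fun (r x : Int) => r + x) st.1 hm0]
    rw [PySem.List.foldl_add _ (fun x => x) _, List.map_id']
    rw [← hst, hslen]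
    rw [sumSmallest_take st.2.length st.2 le_rfl _ (by rw [← hslen]; exact hm0)]
    rw [← hs]
    have hsum : (s.take (PySem.Int.floordiv (st.2.length : Int) 2).toNat).sum
        + (s.drop (PySem.Int.floordiv (st.2.length : Int) 2).toNat).sum = s.sum := by
      rw [← List.sum_append, List.take_append_drop]
    have hssum : s.sum = st.2.sum := (PySem.List.sorted_perm _ _ _).sum_eq
    omega
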